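-- pv_equiv track=rewrite | github.com/ioane369/GOA-Homeworks | Day 21/homework/homework01.py | descending_order1
-- ===== SOURCE A (Python) =====
-- def descending_order1(num):
--     num_str = str(num)
--     reversed_str = ""
--     res_arr = []
--     for i in range(len(num_str)-1, -1, -1):
--         reversed_str += num_str[i]
--     for i in reversed_str:
--         res_arr.append(i)
--     res_arr.sort(reverse = True)
--     return int("".join(res_arr))
-- ===== SOURCE B (Python) =====
-- def descending_order1(num):
--     s = str(num)
--     return int("".join(ch * s.count(ch) for ch in sorted(set(s), reverse=True)))
-- ===== Notes on version B (the rewrite author's own statement) =====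
-- stated objective: simpler
-- what changed: Replaces the character-by-character reversal loop, the append loop and the in-place comparison sort by a one-liner counting rebuild: the distinct characters of str(num) are emitted in descending order, each repeated count(ch) times.
import Mathlib
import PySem

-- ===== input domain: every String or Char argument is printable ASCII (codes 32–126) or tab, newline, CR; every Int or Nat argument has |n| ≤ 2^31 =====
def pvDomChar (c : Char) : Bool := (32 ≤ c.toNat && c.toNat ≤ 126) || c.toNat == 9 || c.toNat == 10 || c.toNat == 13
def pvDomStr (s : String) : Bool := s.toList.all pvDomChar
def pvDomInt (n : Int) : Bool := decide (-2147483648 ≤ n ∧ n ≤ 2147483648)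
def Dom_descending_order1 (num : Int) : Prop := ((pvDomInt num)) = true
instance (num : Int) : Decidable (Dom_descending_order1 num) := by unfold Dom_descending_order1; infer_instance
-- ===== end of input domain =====

-- B rebuilds the result by counting each distinct character of str(num) instead of reversing and comparison-sorting; simpler.

-- ===== PORT A =====
def descending_order1 (num : Int) : Int :=
  let numStr := (PySem.Int.toStr num).toList
  let reversedStr := (PySem.List.pyRange ((numStr.length : Int) - 1) (-1) (-1)).foldl
    (fun acc i => acc ++ [PySem.List.pyGetD numStr i ' ']) []
  let resArr := reversedStr.foldl (fun acc c => acc ++ [c]) []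
  let sortedArr := PySem.List.sorted resArr (fun c => c) true
  (PySem.Int.ofStr? (String.mk sortedArr)).getD 0

-- ===== PORT B =====
def descending_order1_alt (num : Int) : Int :=
  let s := (PySem.Int.toStr num).toList
  let ds := PySem.List.sorted (PySem.Set.ofList s) (fun c => c) true
  let out := ds.flatMap (fun c => List.replicate (s.count c) c)
  (PySem.Int.ofStr? (String.mk out)).getD 0

-- ===== PRECONDITION & SPEC =====
-- Pre_ excludes negative num, on which both A and B raise ValueError at the final int(...) (the '-' sign sorts to the end).
def Pre_descending_order1 (num : Int) : Prop := 0 ≤ num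
instance (num : Int) : Decidable (Pre_descending_order1 num) := by unfold Pre_descending_order1; infer_instance
def pvWitness_descending_order1 : Int := (231)
def Spec_descending_order1 (num : Int) (out : Int) : Prop := out = descending_order1_alt num
instance (num : Int) (out : Int) : Decidable (Spec_descending_order1 num out) := by unfold Spec_descending_order1; infer_instance

-- ===== CLAIM (what is proved, stated in full; the proofs are below) =====
def Claim_equal_descending_order1 : Prop := ∀ (num : Int), Dom_descending_order1 num → Pre_descending_order1 num → Spec_descending_order1 num (descending_order1 num)

-- ===== LEMMAS AND PROOFS =====

theorem foldl_append_singleton {α β : Type} (f : α → β) (l : List α) (init : List β) :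
    l.foldl (fun acc i => acc ++ [f i]) init = init ++ l.map f := by
  induction l generalizing init with
  | nil => simp
  | cons x xs ih => simp [List.foldl, ih]

theorem flatMap_congr_mem {α β : Type} (l : List α) (f g : α → List β)
    (h : ∀ a ∈ l, f a = g a) : l.flatMap f = l.flatMap g := by
  induction l with
  | nil => rfl
  | cons x xs ih =>
    simp only [List.flatMap_cons]
    rw [h x (by simp), ih (fun a ha => h a (by simp [ha]))]

theorem flat_perm (ds cs : List Char) (hnd : ds.Nodup) (hcov : ∀ c ∈ cs, c ∈ ds) :
    (ds.flatMap (fun d => List.replicate (cs.count d) d)).Perm cs := by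
  induction ds generalizing cs with
  | nil =>
    have : cs = [] := by
      cases cs with
      | nil => rfl
      | cons c cs' => exact absurd (hcov c (by simp)) (by simp)
    simp [this]
  | cons d ds' ih =>
    have hd : d ∉ ds' := (List.nodup_cons.mp hnd).1
    have hnd' : ds'.Nodup := (List.nodup_cons.mp hnd).2
    simp only [List.flatMap_cons]
    have hrw : ds'.flatMap (fun e => List.replicate (cs.count e) e)
        = ds'.flatMap (fun e => List.replicate ((cs.filter (fun c => !(c == d))).count e) e) := by
      apply flatMap_congr_mem
      intro e he
      have hne : (!(e == d)) = true := by
        simp only [Bool.not_eq_eq_eq_not, Bool.not_true, beq_eq_false_iff_ne]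
        intro h; exact hd (h ▸ he)
      exact congrArg (fun n => List.replicate n e) (List.count_filter (p := fun c => !(c == d)) (a := e) (l := cs) hne).symm
    rw [hrw]
    have hcov' : ∀ c ∈ cs.filter (fun c => !(c == d)), c ∈ ds' := by
      intro c hc
      have hm := List.mem_of_mem_filter hc
      have hp := List.of_mem_filter hc
      have hcd : c ≠ d := by simpa using hp
      rcases List.mem_cons.mp (hcov c hm) with h | h
      · exact absurd h hcd
      · exact h
    have hih := ih (cs.filter (fun c => !(c == d))) hnd' hcov'
    have hrep : List.replicate (cs.count d) d = cs.filter (fun c => c == d) :=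
      (List.filter_beq d).symm
    refine ((List.Perm.append_left _ hih).trans ?_)
    rw [hrep]
    exact List.filter_append_perm _ _

theorem flat_desc (ds : List Char) (n : Char → Nat) (hds : ds.Pairwise (fun a b => b < a)) :
    (ds.flatMap (fun d => List.replicate (n d) d)).Pairwise (fun a b => b ≤ a) := by
  induction ds with
  | nil => simp
  | cons d ds' ih =>
    have hd1 : ∀ e ∈ ds', e < d := (List.pairwise_cons.mp hds).1
    have hds' : ds'.Pairwise (fun a b => b < a) := (List.pairwise_cons.mp hds).2
    simp only [List.flatMap_cons]
    rw [List.pairwise_append]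
    refine ⟨?_, ih hds', ?_⟩
    · exact List.pairwise_replicate.mpr (Or.inr le_rfl)
    · intro a ha b hb
      have ha' : a = d := List.eq_of_mem_replicate ha
      rcases List.mem_flatMap.mp hb with ⟨e, he, hbe⟩
      have hb' : b = e := List.eq_of_mem_replicate hbe
      rw [ha', hb']
      exact le_of_lt (hd1 e he)

theorem sorted_rev_eq_flat (cs : List Char) :
    PySem.List.sorted cs.reverse (fun c => c) true
      = (PySem.List.sorted (PySem.Set.ofList cs) (fun c => c) true).flatMap
          (fun d => List.replicate (cs.count d) d) := by
  set ds := PySem.List.sorted (PySem.Set.ofList cs) (fun c => c) true with hds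
  set out := ds.flatMap (fun d => List.replicate (cs.count d) d) with hout
  have hpermds : ds.Perm (PySem.Set.ofList cs) := PySem.List.sorted_perm _ _ _
  have hnd : ds.Nodup := hpermds.nodup_iff.mpr (PySem.Set.nodup_ofList cs)
  have hle : ds.Pairwise (fun a b => b ≤ a) := PySem.List.sorted_pairwise_rev _ _
  have hdesc : ds.Pairwise (fun a b => b < a) := by
    have := hle.and hnd
    exact this.imp (fun h => lt_of_le_of_ne h.1 (Ne.symm h.2))
  have hcov : ∀ c ∈ cs, c ∈ ds := by
    intro c hc
    rw [hds, PySem.List.mem_sorted]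
    exact (PySem.Set.mem_ofList cs c).mpr hc
  have hperm : out.Perm cs := flat_perm ds cs hnd hcov
  have houtdesc : out.Pairwise (fun a b => b ≤ a) := flat_desc ds _ hdesc
  set L := PySem.List.sorted cs.reverse (fun c => c) true with hL
  have hLperm : L.Perm cs := (PySem.List.sorted_perm _ _ _).trans cs.reverse_perm
  have hLdesc : L.Pairwise (fun a b => b ≤ a) := PySem.List.sorted_pairwise_rev _ _
  have hrev : L.reverse = out.reverse := by
    apply PySem.List.eq_of_perm_of_pairwise_le_of_injective (key := fun c : Char => c)
      (fun a b h => h)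
    · exact (L.reverse_perm.trans hLperm).trans ((out.reverse_perm.trans hperm).symm)
    · exact (List.pairwise_reverse).mpr hLdesc
    · exact (List.pairwise_reverse).mpr houtdesc
  exact List.reverse_injective hrev

-- ===== VERDICT (by name: the statement is the Claim_ definition above) =====
theorem descending_order1_spec : Claim_equal_descending_order1 := by
  intro num _ _
  unfold Spec_descending_order1 descending_order1 descending_order1_alt
  set cs := (PySem.Int.toStr num).toList with hcs
  have h1 : (PySem.List.pyRange ((cs.length : Int) - 1) (-1) (-1)).foldl
      (fun acc i => acc ++ [PySem.List.pyGetD cs i ' ']) [] = cs.reverse := by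
    rw [foldl_append_singleton (fun i => PySem.List.pyGetD cs i ' ')]
    have hr : PySem.List.pyRange ((cs.length : Int) - 1) (-1) (-1)
        = (PySem.List.pyRange 0 (cs.length : Int) 1).reverse := by
      rw [PySem.List.pyRange_neg_one_eq_reverse]
      norm_num
    rw [hr, List.map_reverse, List.nil_append]
    congr 1
    exact PySem.List.map_pyGetD_pyRange_zero' cs ' '
  simp only [h1]
  rw [foldl_append_singleton (fun c : Char => c), List.map_id', List.nil_append]
  rw [sorted_rev_eq_flat]
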